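-- pv_equiv track=rewrite | github.com/Petroniuss/adpto | lab1-vertex-cover/recursion_2_k.py | VC_2_k
-- ===== SOURCE A (Python) =====
-- def VC_2_k(edges, k, cover, edge_index):
--     while edge_index < len(edges):
--         u, v = edges[edge_index]
--         if not ((u in cover) or (v in cover)):
--             break
--         else:
--             edge_index += 1
--
--     if edge_index >= len(edges):
--         return True, cover
--
--     if k == 0:
--         return False, set()
--
--     u, v = edges[edge_index]
--
--     success, other_cover = VC_2_k(edges, k - 1, cover | {u}, edge_index + 1)
--     if success:
--         return success, other_cover
--
--     return VC_2_k(edges, k - 1, cover | {v}, edge_index + 1)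
-- ===== SOURCE B (Python) =====
-- def VC_2_k(edges, k, cover, edge_index):
--     stack = [(k, cover, edge_index)]
--     while stack:
--         k, cover, i = stack.pop()
--         while i < len(edges):
--             u, v = edges[i]
--             if u in cover or v in cover:
--                 i += 1
--             else:
--                 break
--         if i >= len(edges):
--             return True, cover
--         if k == 0:
--             continue
--         u, v = edges[i]
--         stack.append((k - 1, cover | {v}, i + 1))
--         stack.append((k - 1, cover | {u}, i + 1))
--     return False, set()
-- ===== Notes on version B (the rewrite author's own statement) =====
-- stated objective: alternative
-- what changed: Replaces the recursive DFS branching with an iterative worklist: an explicit stack of (k, cover, edge_index) states popped in a loop (v-branch pushed before u-branch so u is explored first), instead of self-recursion with its implicit call stack.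
import Mathlib
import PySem

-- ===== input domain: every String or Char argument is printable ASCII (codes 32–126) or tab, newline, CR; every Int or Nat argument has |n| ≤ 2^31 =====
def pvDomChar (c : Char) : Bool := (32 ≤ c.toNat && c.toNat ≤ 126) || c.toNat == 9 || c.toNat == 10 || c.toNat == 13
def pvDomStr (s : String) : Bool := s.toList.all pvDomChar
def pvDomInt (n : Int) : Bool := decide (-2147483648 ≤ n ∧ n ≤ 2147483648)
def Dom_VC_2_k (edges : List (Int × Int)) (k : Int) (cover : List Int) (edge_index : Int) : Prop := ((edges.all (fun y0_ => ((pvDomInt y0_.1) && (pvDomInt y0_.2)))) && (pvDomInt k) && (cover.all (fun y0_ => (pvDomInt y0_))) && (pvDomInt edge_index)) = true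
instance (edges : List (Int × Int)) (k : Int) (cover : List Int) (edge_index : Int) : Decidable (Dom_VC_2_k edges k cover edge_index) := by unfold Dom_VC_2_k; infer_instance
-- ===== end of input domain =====

-- B replaces the recursive DFS branching by an iterative explicit-stack worklist loop; same search order, same result.

-- ===== PORT A =====
-- Literal port of A: the while loop advancing edge_index and the two recursive
-- branches become one structural recursion over the same state.  On an
-- out-of-range index (where Python raises IndexError, excluded by Pre_) the
-- pyGet? `none` branch returns a dummy (false, []).
def VC_2_k (edges : List (Int × Int)) (k : Int) (cover : List Int) (edge_index : Int) : Bool × List Int :=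
  if _h : edge_index < (edges.length : Int) then
    match PySem.List.pyGet? edges edge_index with
    | none => (false, [])
    | some (u, v) =>
      if cover.contains u || cover.contains v then
        VC_2_k edges k cover (edge_index + 1)          -- while-loop step: edge already covered
      else
        if k == 0 then (false, [])
        else
          let r1 := VC_2_k edges (k - 1) (PySem.Set.add cover u) (edge_index + 1)
          if r1.1 then r1
          else VC_2_k edges (k - 1) (PySem.Set.add cover v) (edge_index + 1)
  else (true, cover)
termination_by ((edges.length : Int) - edge_index).toNat
decreasing_by all_goals omega

-- ===== PORT B =====
-- B's inner while loop: advance i past edges with an endpoint already in cover.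
def vcAdv (edges : List (Int × Int)) (cover : List Int) (i : Int) : Int :=
  if _h : i < (edges.length : Int) then
    match PySem.List.pyGet? edges i with
    | none => i
    | some (u, v) =>
      if cover.contains u || cover.contains v then vcAdv edges cover (i + 1) else i
  else i
termination_by ((edges.length : Int) - i).toNat
decreasing_by omega

-- weight of one worklist state, for termination of the loop
def vcW (edges : List (Int × Int)) (s : Int × List Int × Int) : Nat :=
  3 ^ (((edges.length : Int) - s.2.2).toNat + 1)

-- (cited by vcLoop's termination proof)
lemma vcAdv_le (edges : List (Int × Int)) (cover : List Int) (i : Int) :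
    i ≤ vcAdv edges cover i := by
  unfold vcAdv
  split
  · rename_i h
    match hg : PySem.List.pyGet? edges i with
    | none => simp
    | some (u, v) =>
      simp only
      split
      · have := vcAdv_le edges cover (i + 1)
        omega
      · omega
  · omega
termination_by ((edges.length : Int) - i).toNat
decreasing_by omega

-- (cited by vcLoop's termination proof)
lemma vc_two_children_lt (L i i' : Int) (hle : i ≤ i') (hlt : i' < L) :
    3 ^ ((L - (i' + 1)).toNat + 1) + 3 ^ ((L - (i' + 1)).toNat + 1) < 3 ^ ((L - i).toNat + 1) := by
  have hab : (L - (i' + 1)).toNat + 1 + 1 ≤ (L - i).toNat + 1 := by omega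
  have h1 : (3:Nat) ^ ((L - (i' + 1)).toNat + 1 + 1) ≤ 3 ^ ((L - i).toNat + 1) :=
    Nat.pow_le_pow_right (by norm_num) hab
  have h2 : (3:Nat) ^ ((L - (i' + 1)).toNat + 1 + 1) = 3 * 3 ^ ((L - (i' + 1)).toNat + 1) := by
    rw [pow_succ]; ring
  have h3 : (0:Nat) < 3 ^ ((L - (i' + 1)).toNat + 1) := pow_pos (by norm_num) _
  omega

-- B's outer worklist loop.
def vcLoop (edges : List (Int × Int)) (stack : List (Int × List Int × Int)) : Bool × List Int :=
  match stack with
  | [] => (false, [])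
  | (k, cover, i) :: rest =>
    let i' := vcAdv edges cover i
    if h2 : i' < (edges.length : Int) then
      if k == 0 then vcLoop edges rest
      else
        match PySem.List.pyGet? edges i' with
        | none => vcLoop edges rest
        | some (u, v) =>
          vcLoop edges ((k - 1, PySem.Set.add cover u, i' + 1) ::
                        (k - 1, PySem.Set.add cover v, i' + 1) :: rest)
    else (true, cover)
termination_by (stack.map (vcW edges)).sum
decreasing_by
  · have h3 : (0:Nat) < vcW edges (k, cover, i) := pow_pos (by norm_num) _
    simp only [List.map_cons, List.sum_cons]
    omega
  · have h3 : (0:Nat) < vcW edges (k, cover, i) := pow_pos (by norm_num) _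
    simp only [List.map_cons, List.sum_cons]
    omega
  · simp only [List.map_cons, List.sum_cons, vcW]
    have := vc_two_children_lt (edges.length : Int) i (vcAdv edges cover i)
      (vcAdv_le edges cover i) h2
    omega

def VC_2_k_alt (edges : List (Int × Int)) (k : Int) (cover : List Int) (edge_index : Int) : Bool × List Int :=
  vcLoop edges [(k, cover, edge_index)]

-- ===== PRECONDITION & SPEC =====
-- Pre_ excludes exactly the inputs where Python A raises IndexError: an
-- edge_index below -len(edges) (then edges[edge_index] is out of range).
def Pre_VC_2_k (edges : List (Int × Int)) (k : Int) (cover : List Int) (edge_index : Int) : Prop :=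
  0 ≤ edge_index + (edges.length : Int)
instance (edges : List (Int × Int)) (k : Int) (cover : List Int) (edge_index : Int) : Decidable (Pre_VC_2_k edges k cover edge_index) := by unfold Pre_VC_2_k; infer_instance

def pvWitness_VC_2_k : (List (Int × Int)) × Int × List Int × Int := ([(1, 2), (2, 3)], 1, [], 0)

def Spec_VC_2_k (edges : List (Int × Int)) (k : Int) (cover : List Int) (edge_index : Int) (out : Bool × List Int) : Prop := out = VC_2_k_alt edges k cover edge_index
instance (edges : List (Int × Int)) (k : Int) (cover : List Int) (edge_index : Int) (out : Bool × List Int) : Decidable (Spec_VC_2_k edges k cover edge_index out) := by unfold Spec_VC_2_k; infer_instance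

-- ===== CLAIM (what is proved, stated in full; the proofs are below) =====
def Claim_equal_VC_2_k : Prop := ∀ (edges : List (Int × Int)) (k : Int) (cover : List Int) (edge_index : Int), Dom_VC_2_k edges k cover edge_index → Pre_VC_2_k edges k cover edge_index → Spec_VC_2_k edges k cover edge_index (VC_2_k edges k cover edge_index)

-- ===== LEMMAS AND PROOFS =====

-- one-step unfolding lemmas for vcAdv
lemma vcAdv_stop (edges : List (Int × Int)) (cover : List Int) (i : Int)
    (h : ¬ i < (edges.length : Int)) : vcAdv edges cover i = i := by
  rw [vcAdv]; simp [h]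

lemma vcAdv_none (edges : List (Int × Int)) (cover : List Int) (i : Int)
    (h : i < (edges.length : Int)) (hg : PySem.List.pyGet? edges i = none) :
    vcAdv edges cover i = i := by
  rw [vcAdv]; simp [h, hg]

lemma vcAdv_step (edges : List (Int × Int)) (cover : List Int) (i u v : Int)
    (h : i < (edges.length : Int)) (hg : PySem.List.pyGet? edges i = some (u, v))
    (hc : (cover.contains u || cover.contains v) = true) :
    vcAdv edges cover i = vcAdv edges cover (i + 1) := by
  rw [vcAdv]; simp only [dif_pos h, hg, hc, if_true]

lemma vcAdv_break (edges : List (Int × Int)) (cover : List Int) (i u v : Int)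
    (h : i < (edges.length : Int)) (hg : PySem.List.pyGet? edges i = some (u, v))
    (hc : (cover.contains u || cover.contains v) = false) :
    vcAdv edges cover i = i := by
  rw [vcAdv]; simp only [dif_pos h, hg, hc, if_false, Bool.false_eq_true]

-- one-step unfolding lemmas for VC_2_k
lemma VC_2_k_done (edges : List (Int × Int)) (k : Int) (cover : List Int) (i : Int)
    (h : ¬ i < (edges.length : Int)) : VC_2_k edges k cover i = (true, cover) := by
  rw [VC_2_k]; simp [h]

lemma VC_2_k_none (edges : List (Int × Int)) (k : Int) (cover : List Int) (i : Int)
    (h : i < (edges.length : Int)) (hg : PySem.List.pyGet? edges i = none) :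
    VC_2_k edges k cover i = (false, []) := by
  rw [VC_2_k]; simp [h, hg]

lemma VC_2_k_covered (edges : List (Int × Int)) (k : Int) (cover : List Int) (i u v : Int)
    (h : i < (edges.length : Int)) (hg : PySem.List.pyGet? edges i = some (u, v))
    (hc : (cover.contains u || cover.contains v) = true) :
    VC_2_k edges k cover i = VC_2_k edges k cover (i + 1) := by
  rw [VC_2_k]; simp only [dif_pos h, hg, hc, if_true]

lemma VC_2_k_branch (edges : List (Int × Int)) (k : Int) (cover : List Int) (i u v : Int)
    (h : i < (edges.length : Int)) (hg : PySem.List.pyGet? edges i = some (u, v))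
    (hc : (cover.contains u || cover.contains v) = false) :
    VC_2_k edges k cover i =
      (if k == 0 then (false, [])
       else
         if (VC_2_k edges (k - 1) (PySem.Set.add cover u) (i + 1)).1 then
           VC_2_k edges (k - 1) (PySem.Set.add cover u) (i + 1)
         else VC_2_k edges (k - 1) (PySem.Set.add cover v) (i + 1)) := by
  rw [VC_2_k]; simp only [dif_pos h, hg, hc, if_false, Bool.false_eq_true]

-- A is invariant under B's advance: skipping covered edges keeps A's result.
lemma VC_2_k_adv (edges : List (Int × Int)) (k : Int) (cover : List Int) (i : Int) :
    VC_2_k edges k cover i = VC_2_k edges k cover (vcAdv edges cover i) := by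
  by_cases h : i < (edges.length : Int)
  · match hg : PySem.List.pyGet? edges i with
    | none => rw [vcAdv_none edges cover i h hg]
    | some (u, v) =>
      by_cases hc : (cover.contains u || cover.contains v) = true
      · rw [VC_2_k_covered edges k cover i u v h hg hc, vcAdv_step edges cover i u v h hg hc]
        exact VC_2_k_adv edges k cover (i + 1)
      · rw [vcAdv_break edges cover i u v h hg (by simpa using hc)]
  · rw [vcAdv_stop edges cover i h]
termination_by ((edges.length : Int) - i).toNat
decreasing_by omega

-- After advancing, the edge at the new index (if any) is uncovered.
lemma vcAdv_uncovered (edges : List (Int × Int)) (cover : List Int) (i u v : Int)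
    (hg : PySem.List.pyGet? edges (vcAdv edges cover i) = some (u, v)) :
    (cover.contains u || cover.contains v) = false := by
  by_cases h : i < (edges.length : Int)
  · match hg0 : PySem.List.pyGet? edges i with
    | none =>
      rw [vcAdv_none edges cover i h hg0] at hg
      rw [hg0] at hg; cases hg
    | some (u0, v0) =>
      by_cases hc : (cover.contains u0 || cover.contains v0) = true
      · rw [vcAdv_step edges cover i u0 v0 h hg0 hc] at hg
        exact vcAdv_uncovered edges cover (i + 1) u v hg
      · have hc' : (cover.contains u0 || cover.contains v0) = false := by simpa using hc
        rw [vcAdv_break edges cover i u0 v0 h hg0 hc'] at hg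
        rw [hg0] at hg; cases hg; exact hc'
  · rw [vcAdv_stop edges cover i h] at hg
    match hg1 : PySem.List.pyGet? edges i with
    | none => rw [hg1] at hg; cases hg
    | some (u1, v1) =>
      exfalso
      have hnone : PySem.List.pyGet? edges i = none := by
        rw [PySem.List.pyGet?_eq_none_iff]
        intro hin
        simp only [PySem.Raise.InRange] at hin
        omega
      rw [hg1] at hnone; cases hnone
termination_by ((edges.length : Int) - i).toNat
decreasing_by omega

-- A returns exactly (false, []) whenever it fails.
lemma VC_2_k_false (edges : List (Int × Int)) (k : Int) (cover : List Int) (i : Int)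
    (hf : (VC_2_k edges k cover i).1 = false) : VC_2_k edges k cover i = (false, []) := by
  by_cases h : i < (edges.length : Int)
  · match hg : PySem.List.pyGet? edges i with
    | none => exact VC_2_k_none edges k cover i h hg
    | some (u, v) =>
      by_cases hc : (cover.contains u || cover.contains v) = true
      · rw [VC_2_k_covered edges k cover i u v h hg hc] at hf ⊢
        exact VC_2_k_false edges k cover (i + 1) hf
      · have hc' : (cover.contains u || cover.contains v) = false := by simpa using hc
        rw [VC_2_k_branch edges k cover i u v h hg hc'] at hf ⊢
        by_cases hk : k == 0
        · simp [hk]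
        · simp only [hk, if_false, Bool.false_eq_true] at hf ⊢
          by_cases hu : (VC_2_k edges (k - 1) (PySem.Set.add cover u) (i + 1)).1 = true
          · rw [if_pos hu] at hf
            exact absurd hf (by simp [hu])
          · have hu' : (VC_2_k edges (k - 1) (PySem.Set.add cover u) (i + 1)).1 = false := by
              simpa using hu
            simp only [hu', if_false, Bool.false_eq_true] at hf ⊢
            exact VC_2_k_false edges (k - 1) (PySem.Set.add cover v) (i + 1) hf
  · rw [VC_2_k_done edges k cover i h] at hf
    cases hf
termination_by ((edges.length : Int) - i).toNat
decreasing_by all_goals omega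

-- Main loop invariant: processing a stack is "try the top state with A; on
-- failure continue with the rest of the worklist".
lemma vcLoop_eq (edges : List (Int × Int)) (k : Int) (cover : List Int) (i : Int)
    (rest : List (Int × List Int × Int)) :
    vcLoop edges ((k, cover, i) :: rest) =
      (if (VC_2_k edges k cover i).1 then VC_2_k edges k cover i
       else vcLoop edges rest) := by
  rw [vcLoop]
  rw [VC_2_k_adv edges k cover i]
  by_cases h2 : vcAdv edges cover i < (edges.length : Int)
  · match hg : PySem.List.pyGet? edges (vcAdv edges cover i) with
    | none =>
      have hA := VC_2_k_none edges k cover (vcAdv edges cover i) h2 hg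
      by_cases hk : k == 0
      · simp [h2, hg, hA, hk]
      · simp [h2, hg, hA, hk]
    | some (u, v) =>
      have hc := vcAdv_uncovered edges cover i u v hg
      have hA := VC_2_k_branch edges k cover (vcAdv edges cover i) u v h2 hg hc
      by_cases hk : k == 0
      · simp only [dif_pos h2, hk, if_true, hA]
        simp [hk]
      · simp only [dif_pos h2, hk, if_false, Bool.false_eq_true, hg, hA]
        rw [vcLoop_eq edges (k - 1) (PySem.Set.add cover u) (vcAdv edges cover i + 1)
              ((k - 1, PySem.Set.add cover v, vcAdv edges cover i + 1) :: rest)]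
        rw [vcLoop_eq edges (k - 1) (PySem.Set.add cover v) (vcAdv edges cover i + 1) rest]
        by_cases hu : (VC_2_k edges (k - 1) (PySem.Set.add cover u) (vcAdv edges cover i + 1)).1
        · simp [hu]
        · simp [hu]
  · have hA := VC_2_k_done edges k cover (vcAdv edges cover i) h2
    simp [h2, hA]
termination_by (((k, cover, i) :: rest).map (vcW edges)).sum
decreasing_by
  all_goals simp only [List.map_cons, List.sum_cons, vcW]
  all_goals (have h1 := vc_two_children_lt (edges.length : Int) i (vcAdv edges cover i)
               (vcAdv_le edges cover i) h2;
             have h0 : (0:Nat) < 3 ^ (((edges.length : Int) - (vcAdv edges cover i + 1)).toNat) :=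
               pow_pos (by norm_num) _;
             omega)

-- ===== VERDICT (by name: the statement is the Claim_ definition above) =====
theorem VC_2_k_spec : Claim_equal_VC_2_k := by
  intro edges k cover edge_index _hDom _hPre
  unfold Spec_VC_2_k VC_2_k_alt
  rw [vcLoop_eq]
  by_cases h : (VC_2_k edges k cover edge_index).1 = true
  · simp [h]
  · have h' : (VC_2_k edges k cover edge_index).1 = false := by simpa using h
    simp only [h', if_false, Bool.false_eq_true, vcLoop]
    exact VC_2_k_false edges k cover edge_index h'
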